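-- pv_equiv track=rewrite | github.com/nonomal/ClickHouse | ci/jobs/scripts/find_symbols.py | expand_line_numbers
-- ===== SOURCE A (Python) =====
-- def expand_line_numbers(line_numbers: list, radius: int) -> list:
--     """Expand each (file, line) to include +/-radius nearby lines."""
--     expanded = set()
--     for filename, line_no in line_numbers:
--         for offset in range(-radius, radius + 1):
--             new_line = line_no + offset
--             if new_line > 0:
--                 expanded.add((filename, new_line))
--     return sorted(expanded)
-- ===== SOURCE B (Python) =====
-- def expand_line_numbers(line_numbers: list, radius: int) -> list:
--     """Expand each (file, line) to include +/-radius nearby lines.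
--
--     Group lines by file, sort each group once, and sweep it left to right,
--     emitting each covered line exactly once (merging overlapping intervals),
--     instead of materialising every expanded line in a set and sorting that.
--     """
--     by_file = {}
--     for filename, line_no in line_numbers:
--         by_file.setdefault(filename, []).append(line_no)
--     out = []
--     for filename in sorted(by_file):
--         last = 0
--         for line_no in sorted(by_file[filename]):
--             for new_line in range(max(last + 1, line_no - radius), line_no + radius + 1):
--                 out.append((filename, new_line))
--             last = max(last, line_no + radius)
--     return out
-- ===== Notes on version B (the rewrite author's own statement) =====
-- stated objective: faster
-- what changed: Instead of inserting every one of the n*(2r+1) expanded lines into a set and sorting that, B groups the points by file, sorts each file's points once, and sweeps them in order merging overlapping +/-radius intervals, emitting each output line exactly once already in sorted order.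
import Mathlib
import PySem

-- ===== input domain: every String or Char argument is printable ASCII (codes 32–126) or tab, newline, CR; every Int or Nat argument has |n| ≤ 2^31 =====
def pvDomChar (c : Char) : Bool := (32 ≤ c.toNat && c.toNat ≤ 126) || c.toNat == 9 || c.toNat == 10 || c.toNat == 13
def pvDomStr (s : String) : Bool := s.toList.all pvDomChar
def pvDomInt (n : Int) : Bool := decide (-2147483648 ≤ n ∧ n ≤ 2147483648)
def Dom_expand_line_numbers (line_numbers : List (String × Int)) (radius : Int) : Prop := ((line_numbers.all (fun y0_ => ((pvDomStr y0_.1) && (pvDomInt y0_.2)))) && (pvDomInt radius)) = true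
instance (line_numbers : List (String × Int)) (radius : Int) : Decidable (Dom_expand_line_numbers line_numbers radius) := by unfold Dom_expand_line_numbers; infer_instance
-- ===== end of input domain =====

-- B builds the sorted expansion directly (group by file, sort, merge ±radius intervals)
-- instead of A's set-of-all-expanded-lines followed by a global sort.

-- ===== PORT A =====
-- sorted(expanded) on 2-tuples: Python's tuple comparison is lexicographic, ported via the toLex key.
def expand_line_numbers (line_numbers : List (String × Int)) (radius : Int) : List (String × Int) :=
  let expanded : PySem.Set (String × Int) :=
    line_numbers.foldl (fun exp p =>
      (PySem.List.pyRange (-radius) (radius + 1)).foldl (fun exp offset =>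
        let new_line := p.2 + offset
        if new_line > 0 then PySem.Set.add exp (p.1, new_line) else exp) exp)
      PySem.Set.empty
  PySem.List.sorted expanded (fun p => toLex p)

-- ===== PORT B =====
def expand_line_numbers_alt (line_numbers : List (String × Int)) (radius : Int) : List (String × Int) :=
  let by_file : PySem.Dict String (List Int) :=
    line_numbers.foldl (fun d p => d.modify p.1 [] (fun x => x ++ [p.2])) PySem.Dict.empty
  (PySem.List.sorted by_file.keys (fun f => f)).foldl (fun out f =>
    ((PySem.List.sorted (by_file.getD f []) (fun l => l)).foldl
      (fun (s : List (String × Int) × Int) l =>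
        (s.1 ++ (PySem.List.pyRange (max (s.2 + 1) (l - radius)) (l + radius + 1)).map (fun x => (f, x)),
         max s.2 (l + radius)))
      (out, 0)).1) []

-- ===== PRECONDITION & SPEC =====
def Spec_expand_line_numbers (line_numbers : List (String × Int)) (radius : Int) (out : List (String × Int)) : Prop := out = expand_line_numbers_alt line_numbers radius
instance (line_numbers : List (String × Int)) (radius : Int) (out : List (String × Int)) : Decidable (Spec_expand_line_numbers line_numbers radius out) := by unfold Spec_expand_line_numbers; infer_instance

-- ===== CLAIM (what is proved, stated in full; the proofs are below) =====
def Claim_equal_expand_line_numbers : Prop := ∀ (line_numbers : List (String × Int)) (radius : Int), Dom_expand_line_numbers line_numbers radius → Spec_expand_line_numbers line_numbers radius (expand_line_numbers line_numbers radius)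

-- ===== LEMMAS AND PROOFS =====

-- the emitted line numbers of one file's merge sweep, as a recursion on the sorted line list
def pvEmit (r : Int) : Int → List Int → List Int
  | _, [] => []
  | last, l :: ls => PySem.List.pyRange (max (last + 1) (l - r)) (l + r + 1) ++ pvEmit r (max last (l + r)) ls

theorem pvFoldl_emit (f : String) (r : Int) (ls : List Int) :
    ∀ (out : List (String × Int)) (last : Int),
      ls.foldl (fun (s : List (String × Int) × Int) l =>
        (s.1 ++ (PySem.List.pyRange (max (s.2 + 1) (l - r)) (l + r + 1)).map (fun x => (f, x)),
         max s.2 (l + r))) (out, last)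
      = (out ++ (pvEmit r last ls).map (fun x => (f, x)), (ls.foldl (fun a l => max a (l + r)) last)) := by
  induction ls with
  | nil => intro out last; simp [pvEmit]
  | cons l ls ih =>
    intro out last
    simp only [List.foldl_cons, pvEmit, List.map_append, List.append_assoc, ih]

theorem pvMem_emit (r : Int) (ls : List Int) (hls : ls.Pairwise (· ≤ ·)) :
    ∀ (last x : Int), x ∈ pvEmit r last ls ↔ last < x ∧ ∃ l ∈ ls, l - r ≤ x ∧ x ≤ l + r := by
  induction ls with
  | nil => intro last x; simp [pvEmit]
  | cons l ls ih =>
    intro last x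
    have hhead : ∀ l' ∈ ls, l ≤ l' := (List.pairwise_cons.mp hls).1
    have htail := ih (List.pairwise_cons.mp hls).2 (max last (l + r)) x
    simp only [pvEmit, List.mem_append, PySem.List.mem_pyRange_one, htail, List.mem_cons]
    constructor
    · rintro (⟨h1, h2⟩ | ⟨h1, l', hl', h2, h3⟩)
      · exact ⟨by omega, l, Or.inl rfl, by omega, by omega⟩
      · exact ⟨by omega, l', Or.inr hl', h2, h3⟩
    · rintro ⟨hlast, l', (rfl | hl'), h2, h3⟩
      · left; omega
      · by_cases hc : x ≤ l + r
        · have := hhead l' hl'; left; omega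
        · right; exact ⟨by omega, l', hl', h2, h3⟩

theorem pvPairwise_emit (r : Int) (ls : List Int) (hls : ls.Pairwise (· ≤ ·)) :
    ∀ (last : Int), (pvEmit r last ls).Pairwise (· < ·) := by
  induction ls with
  | nil => intro last; simp [pvEmit]
  | cons l ls ih =>
    intro last
    simp only [pvEmit]
    rw [List.pairwise_append]
    refine ⟨PySem.List.pairwise_lt_pyRange_one _ _, ih (List.pairwise_cons.mp hls).2 _, ?_⟩
    intro a ha b hb
    have ha' := PySem.List.mem_pyRange_one.mp ha
    have hb' := (pvMem_emit r ls (List.pairwise_cons.mp hls).2 _ b).mp hb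
    omega

-- membership in A's set accumulator
theorem pvMem_inner (r : Int) (p : String × Int) (os : List Int) :
    ∀ (exp : PySem.Set (String × Int)) (hnd : exp.Nodup),
      (∀ y, y ∈ os.foldl (fun exp offset =>
          if p.2 + offset > 0 then PySem.Set.add exp (p.1, p.2 + offset) else exp) exp ↔
        y ∈ exp ∨ ∃ o ∈ os, p.2 + o > 0 ∧ y = (p.1, p.2 + o)) ∧
      (os.foldl (fun exp offset =>
          if p.2 + offset > 0 then PySem.Set.add exp (p.1, p.2 + offset) else exp) exp).Nodup := by
  induction os with
  | nil => intro exp hnd; exact ⟨by simp, hnd⟩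
  | cons o os ih =>
    intro exp hnd
    by_cases hpos : p.2 + o > 0
    · have := ih (PySem.Set.add exp (p.1, p.2 + o)) (PySem.Set.nodup_add _ _ hnd)
      refine ⟨fun y => ?_, ?_⟩
      · rw [List.foldl_cons, if_pos hpos, (this.1 y), PySem.Set.mem_add]
        constructor
        · rintro ((h | h) | ⟨o', ho', h1, h2⟩)
          · exact Or.inl h
          · exact Or.inr ⟨o, List.mem_cons_self, hpos, h⟩
          · exact Or.inr ⟨o', List.mem_cons_of_mem _ ho', h1, h2⟩
        · rintro (h | ⟨o', ho', h1, h2⟩)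
          · exact Or.inl (Or.inl h)
          · rcases List.mem_cons.mp ho' with rfl | ho'
            · exact Or.inl (Or.inr h2)
            · exact Or.inr ⟨o', ho', h1, h2⟩
      · rw [List.foldl_cons, if_pos hpos]; exact this.2
    · have := ih exp hnd
      refine ⟨fun y => ?_, ?_⟩
      · rw [List.foldl_cons, if_neg hpos, (this.1 y)]
        constructor
        · rintro (h | ⟨o', ho', h1, h2⟩)
          · exact Or.inl h
          · exact Or.inr ⟨o', List.mem_cons_of_mem _ ho', h1, h2⟩
        · rintro (h | ⟨o', ho', h1, h2⟩)
          · exact Or.inl h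
          · rcases List.mem_cons.mp ho' with rfl | ho'
            · omega
            · exact Or.inr ⟨o', ho', h1, h2⟩
      · rw [List.foldl_cons, if_neg hpos]; exact this.2

theorem pvMem_outer (r : Int) (lns : List (String × Int)) :
    ∀ (exp : PySem.Set (String × Int)) (hnd : exp.Nodup),
      (∀ y, y ∈ lns.foldl (fun exp p =>
          (PySem.List.pyRange (-r) (r + 1)).foldl (fun exp offset =>
            if p.2 + offset > 0 then PySem.Set.add exp (p.1, p.2 + offset) else exp) exp) exp ↔
        y ∈ exp ∨ ∃ p ∈ lns, ∃ o, -r ≤ o ∧ o < r + 1 ∧ p.2 + o > 0 ∧ y = (p.1, p.2 + o)) ∧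
      (lns.foldl (fun exp p =>
          (PySem.List.pyRange (-r) (r + 1)).foldl (fun exp offset =>
            if p.2 + offset > 0 then PySem.Set.add exp (p.1, p.2 + offset) else exp) exp) exp).Nodup := by
  induction lns with
  | nil => intro exp hnd; simp [hnd]
  | cons p lns ih =>
    intro exp hnd
    have hinner := pvMem_inner r p (PySem.List.pyRange (-r) (r + 1)) exp hnd
    have := ih _ hinner.2
    refine ⟨fun y => ?_, by rw [List.foldl_cons]; exact this.2⟩
    rw [List.foldl_cons, this.1 y, hinner.1 y]
    constructor
    · rintro ((h | ⟨o, ho, h1, h2⟩) | ⟨p', hp', o, h1, h2, h3, h4⟩)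
      · exact Or.inl h
      · have := PySem.List.mem_pyRange_one.mp ho
        exact Or.inr ⟨p, List.mem_cons_self, o, this.1, this.2, h1, h2⟩
      · exact Or.inr ⟨p', List.mem_cons_of_mem _ hp', o, h1, h2, h3, h4⟩
    · rintro (h | ⟨p', hp', o, h1, h2, h3, h4⟩)
      · exact Or.inl (Or.inl h)
      · rcases List.mem_cons.mp hp' with rfl | hp'
        · exact Or.inl (Or.inr ⟨o, PySem.List.mem_pyRange_one.mpr ⟨h1, h2⟩, h3, h4⟩)
        · exact Or.inr ⟨p', hp', o, h1, h2, h3, h4⟩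

-- lexicographic pairwise for the flatMap of per-file blocks
theorem pvPairwise_flatMap (fs : List String) (g : String → List Int)
    (hfs : fs.Pairwise (· < ·)) (hg : ∀ f, (g f).Pairwise (· < ·)) :
    (fs.flatMap (fun f => (g f).map (fun x => (f, x)))).Pairwise
      (fun a b => toLex a < toLex b) := by
  induction fs with
  | nil => simp
  | cons f fs ih =>
    simp only [List.flatMap_cons]
    rw [List.pairwise_append]
    refine ⟨?_, ih (List.pairwise_cons.mp hfs).2, ?_⟩
    · refine List.Pairwise.map _ ?_ (hg f)
      intro a b hab
      rw [Prod.Lex.lt_iff]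
      exact Or.inr ⟨rfl, hab⟩
    · intro a ha b hb
      simp only [List.mem_map] at ha
      obtain ⟨x, hx, rfl⟩ := ha
      simp only [List.mem_flatMap, List.mem_map] at hb
      obtain ⟨f', hf', x', hx', rfl⟩ := hb
      rw [Prod.Lex.lt_iff]
      exact Or.inl ((List.pairwise_cons.mp hfs).1 f' hf')

-- ===== VERDICT (by name: the statement is the Claim_ definition above) =====
-- strings strictly increasing in the sorted key list
theorem pvSorted_keys_lt (keys : List String) (hnd : keys.Nodup) :
    (PySem.List.sorted keys (fun f => f)).Pairwise (· < ·) := by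
  have hle := PySem.List.sorted_pairwise keys (fun f => f)
  have hnd' : (PySem.List.sorted keys (fun f => f)).Nodup :=
    ((PySem.List.sorted_perm keys (fun f => f) false).nodup_iff).mpr hnd
  exact (hle.and hnd').imp (fun h => lt_of_le_of_ne h.1 h.2)

theorem expand_line_numbers_spec : Claim_equal_expand_line_numbers := by
  intro lns r _
  unfold Spec_expand_line_numbers expand_line_numbers expand_line_numbers_alt
  simp only []
  set d : PySem.Dict String (List Int) :=
    lns.foldl (fun d p => d.modify p.1 [] (fun x => x ++ [p.2])) PySem.Dict.empty with hd
  -- rewrite B's outer loop into a flatMap of per-file blocks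
  have hstep : (fun (out : List (String × Int)) (f : String) =>
      ((PySem.List.sorted (d.getD f []) (fun l => l)).foldl
        (fun (s : List (String × Int) × Int) l =>
          (s.1 ++ (PySem.List.pyRange (max (s.2 + 1) (l - r)) (l + r + 1)).map (fun x => (f, x)),
           max s.2 (l + r)))
        (out, 0)).1)
      = (fun out f => out ++ (pvEmit r 0 (PySem.List.sorted (d.getD f []) (fun l => l))).map (fun x => (f, x))) := by
    funext out f
    rw [pvFoldl_emit]
  rw [hstep, PySem.List.foldl_append_eq_flatMap, List.nil_append]
  -- facts about the grouping dict
  have hkeysnd : d.keys.Nodup := by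
    rw [hd]
    exact PySem.Dict.nodup_keys_foldl_modify_key lns (fun p => p.1) []
      (fun d p => (fun x => x ++ [p.2])) PySem.Dict.empty (by simp [PySem.Dict.keys_empty])
  have hmemkeys : ∀ f : String, f ∈ d.keys ↔ ∃ l, (f, l) ∈ lns := by
    intro f
    rw [hd, PySem.Dict.keys_foldl_modify_key lns (fun p => p.1) []
      (fun d p => (fun x => x ++ [p.2])) PySem.Dict.empty]
    simp only [PySem.Dict.keys_empty]
    rw [show PySem.Set.update [] (lns.map (fun p => p.1)) = PySem.Set.ofList (lns.map (fun p => p.1)) from rfl]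
    rw [PySem.Set.mem_ofList]
    simp only [List.mem_map]
    constructor
    · rintro ⟨p, hp, rfl⟩; exact ⟨p.2, hp⟩
    · rintro ⟨l, hl⟩; exact ⟨(f, l), hl, rfl⟩
  have hmemlines : ∀ (f : String) (l : Int), l ∈ d.getD f [] ↔ (f, l) ∈ lns := by
    intro f l
    rw [hd, PySem.Dict.getD_foldl_modify_append, PySem.Dict.getD_empty, List.nil_append]
    simp only [List.mem_map, List.mem_filter, beq_iff_eq]
    constructor
    · rintro ⟨p, ⟨hp, rfl⟩, rfl⟩; exact hp
    · intro h; exact ⟨(f, l), ⟨h, rfl⟩, rfl⟩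
  have hfs : (PySem.List.sorted d.keys (fun f => f)).Pairwise (· < ·) := pvSorted_keys_lt d.keys hkeysnd
  have hlinesle : ∀ f : String, (PySem.List.sorted (d.getD f []) (fun l => l)).Pairwise (· ≤ ·) :=
    fun f => PySem.List.sorted_pairwise (d.getD f []) (fun l => l)
  -- B's output: strictly lex-sorted, with the right members
  have hBpw : (List.flatMap (fun f => (pvEmit r 0 (PySem.List.sorted (d.getD f []) (fun l => l))).map (fun x => (f, x)))
      (PySem.List.sorted d.keys (fun f => f))).Pairwise (fun a b => toLex a < toLex b) :=
    pvPairwise_flatMap _ _ hfs (fun f => pvPairwise_emit r _ (hlinesle f) 0)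
  have hBnd : (List.flatMap (fun f => (pvEmit r 0 (PySem.List.sorted (d.getD f []) (fun l => l))).map (fun x => (f, x)))
      (PySem.List.sorted d.keys (fun f => f))).Nodup := by
    refine hBpw.imp ?_
    intro a b hlt
    rintro rfl
    exact lt_irrefl _ hlt
  -- A's set: nodup, with the same members
  have hA := pvMem_outer r lns PySem.Set.empty (by simp [PySem.Set.empty])
  have hmem : ∀ y, y ∈ List.flatMap (fun f => (pvEmit r 0 (PySem.List.sorted (d.getD f []) (fun l => l))).map (fun x => (f, x)))
      (PySem.List.sorted d.keys (fun f => f)) ↔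
      y ∈ lns.foldl (fun exp p =>
        (PySem.List.pyRange (-r) (r + 1)).foldl (fun exp offset =>
          if p.2 + offset > 0 then PySem.Set.add exp (p.1, p.2 + offset) else exp) exp) PySem.Set.empty := by
    rintro ⟨g, x⟩
    rw [hA.1, List.mem_flatMap]
    simp only [List.mem_map, PySem.List.mem_sorted, PySem.Set.empty, List.not_mem_nil, false_or]
    constructor
    · rintro ⟨f, hf, x', hx', he⟩
      have he1 : f = g := congrArg Prod.fst he
      have he2 : x' = x := congrArg Prod.snd he
      obtain ⟨hx0, l, hl, h1, h2⟩ := (pvMem_emit r _ (hlinesle f) 0 x').mp hx'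
      rw [PySem.List.mem_sorted, hmemlines] at hl
      refine ⟨(f, l), hl, x - l, by omega, by omega, by omega, ?_⟩
      rw [← he1]
      exact Prod.ext rfl (by omega)
    · rintro ⟨p, hp, o, h1, h2, h3, he⟩
      have he1 : g = p.1 := congrArg Prod.fst he
      have he2 : x = p.2 + o := congrArg Prod.snd he
      have hpm : (p.1, p.2) ∈ lns := by simpa using hp
      refine ⟨p.1, (hmemkeys p.1).mpr ⟨p.2, hpm⟩, x, ?_, by rw [he1]⟩
      refine (pvMem_emit r _ (hlinesle p.1) 0 x).mpr ⟨by omega, p.2, ?_, by omega, by omega⟩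
      rw [PySem.List.mem_sorted, hmemlines]
      exact hpm
  exact PySem.List.sorted_eq_of_perm_of_pairwise_lt _ _ (fun p => toLex p)
    ((List.perm_ext_iff_of_nodup hBnd hA.2).mpr (fun y => (hmem y).trans (Iff.refl _)))
    hBpw
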